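-- pv_equiv track=rewrite | github.com/Ramanan98/AdventOfCode | Day10/puzzle.py | find_trailhead_scores
-- ===== SOURCE A (Python) =====
-- def find_trailhead_scores(grid):
--     rows, cols = len(grid), len(grid[0])
--     trailheads = []
--     peaks = []
--     for i in range(rows):
--         for j in range(cols):
--             if grid[i][j] == 0:
--                 trailheads.append((i, j))
--             elif grid[i][j] == 9:
--                 peaks.append((i, j))
--
--     def get_valid_neighbors(r, c, curr_height):
--         # right, down, left, up directions
--         directions = [(0, 1), (1, 0), (0, -1), (-1, 0)]
--         neighbors = []
--         for dr, dc in directions: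
--             new_r, new_c = r + dr, c + dc
--             if (0 <= new_r < rows and
--                 0 <= new_c < cols and
--                 grid[new_r][new_c] == curr_height + 1):
--                 neighbors.append((new_r, new_c))
--         return neighbors
--
--     def count_paths(start_r, start_c):
--         visited = set()
--         reachable_peaks = set()
--
--         def dfs(r, c):
--             if (r, c) in visited:
--                 return
--             visited.add((r, c))
--             curr_height = grid[r][c]
--             if curr_height == 9:
--                 reachable_peaks.add((r, c))
--                 return
--             for next_r, next_c in get_valid_neighbors(r, c, curr_height):
--                 dfs(next_r, next_c)
--
--         dfs(start_r, start_c)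
--         return len(reachable_peaks)
--
--     total_score = 0
--     for r, c in trailheads:
--         score = count_paths(r, c)
--         total_score += score
--
--     return total_score
-- ===== SOURCE B (Python) =====
-- def find_trailhead_scores(grid):
--     rows, cols = len(grid), len(grid[0])
--     total = 0
--     for i in range(rows):
--         for j in range(cols):
--             if grid[i][j] == 0:
--                 frontier = {(i, j)}
--                 for h in range(1, 10):
--                     nxt = set()
--                     for (r, c) in frontier:
--                         for (nr, nc) in ((r, c + 1), (r + 1, c), (r, c - 1), (r - 1, c)):
--                             if 0 <= nr < rows and 0 <= nc < cols and grid[nr][nc] == h: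
--                                 nxt.add((nr, nc))
--                     frontier = nxt
--                 total += len(frontier)
--     return total
-- ===== Notes on version B (the rewrite author's own statement) =====
-- stated objective: alternative
-- what changed: Per-trailhead recursive DFS with a shared visited set is replaced by an iterative level-synchronous frontier expansion: starting from {trailhead}, the set of reachable cells of height h is computed for h = 1..9 in nine set-expansion steps, and the score is the size of the final height-9 frontier; no recursion and no visited set.
import Mathlib
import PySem

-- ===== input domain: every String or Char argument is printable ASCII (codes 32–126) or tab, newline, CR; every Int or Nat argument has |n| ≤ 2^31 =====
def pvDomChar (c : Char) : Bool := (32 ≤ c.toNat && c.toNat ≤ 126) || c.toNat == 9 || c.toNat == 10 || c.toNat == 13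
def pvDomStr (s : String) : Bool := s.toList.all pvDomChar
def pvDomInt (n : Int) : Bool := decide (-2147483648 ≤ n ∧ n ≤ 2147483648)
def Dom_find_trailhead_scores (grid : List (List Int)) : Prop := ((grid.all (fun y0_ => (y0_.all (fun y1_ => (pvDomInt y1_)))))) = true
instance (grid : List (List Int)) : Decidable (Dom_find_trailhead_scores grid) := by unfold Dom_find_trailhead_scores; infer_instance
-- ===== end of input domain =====

-- B replaces A's per-trailhead recursive DFS with a visited set by an iterative
-- level-synchronous frontier expansion over heights 1..9 (alternative algorithm,
-- same return value on Pre_).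


-- grid[r][c]; total indexing form, only ever used under in-range guards
def pvAt (grid : List (List Int)) (r c : Int) : Int :=
  PySem.List.pyGetD (PySem.List.pyGetD grid r []) c 0

-- ===== PORT A =====
def pvScan (grid : List (List Int)) (rows cols : Int) :
    List (Int × Int) × List (Int × Int) :=
  (PySem.List.pyRange 0 rows 1).foldl (fun acc i =>
    (PySem.List.pyRange 0 cols 1).foldl (fun acc j =>
      if pvAt grid i j = 0 then (acc.1 ++ [(i, j)], acc.2)
      else if pvAt grid i j = 9 then (acc.1, acc.2 ++ [(i, j)])
      else acc) acc) ([], [])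

-- trailhead list of the scan: first components, row-major filter

def pvNbrs (grid : List (List Int)) (rows cols r c h : Int) : List (Int × Int) :=
  [((0 : Int), (1 : Int)), (1, 0), (0, -1), (-1, 0)].foldl (fun ns d =>
    if 0 ≤ r + d.1 ∧ r + d.1 < rows ∧ 0 ≤ c + d.2 ∧ c + d.2 < cols ∧
        pvAt grid (r + d.1) (c + d.2) = h + 1
    then ns ++ [(r + d.1, c + d.2)] else ns) []

-- dfs(r, c) threading (visited, reachable_peaks); the Nat fuel is only a totality
-- guard: heights strictly increase along moves and stop at 9, so from a height-0
-- start fuel 10 is never exhausted.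
def pvDfs (grid : List (List Int)) (rows cols : Int) :
    Nat → Int × Int → PySem.Set (Int × Int) × PySem.Set (Int × Int) →
    PySem.Set (Int × Int) × PySem.Set (Int × Int)
  | 0, _, st => st
  | fuel + 1, rc, st =>
    if rc ∈ st.1 then st
    else
      let vis := PySem.Set.add st.1 rc
      let h := pvAt grid rc.1 rc.2
      if h = 9 then (vis, PySem.Set.add st.2 rc)
      else (pvNbrs grid rows cols rc.1 rc.2 h).foldl
        (fun st n => pvDfs grid rows cols fuel n st) (vis, st.2)

def find_trailhead_scores (grid : List (List Int)) : Int :=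
  let rows : Int := grid.length
  let cols : Int := (PySem.List.pyGetD grid 0 []).length
  let tp := pvScan grid rows cols
  tp.1.foldl (fun total rc =>
    total + PySem.Set.len
      (pvDfs grid rows cols 10 rc (PySem.Set.empty, PySem.Set.empty)).2) 0

-- ===== PORT B =====
-- one frontier step: the set of in-bounds orthogonal neighbours of frontier cells
-- whose grid value is exactly h
def pvNext (grid : List (List Int)) (rows cols : Int)
    (frontier : PySem.Set (Int × Int)) (h : Int) : PySem.Set (Int × Int) :=
  frontier.foldl (fun nxt rc =>
    [(rc.1, rc.2 + 1), (rc.1 + 1, rc.2), (rc.1, rc.2 - 1), (rc.1 - 1, rc.2)].foldl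
      (fun nxt n =>
        if 0 ≤ n.1 ∧ n.1 < rows ∧ 0 ≤ n.2 ∧ n.2 < cols ∧ pvAt grid n.1 n.2 = h
        then PySem.Set.add nxt n else nxt) nxt) PySem.Set.empty

def find_trailhead_scores_alt (grid : List (List Int)) : Int :=
  let rows : Int := grid.length
  let cols : Int := (PySem.List.pyGetD grid 0 []).length
  (PySem.List.pyRange 0 rows 1).foldl (fun total i =>
    (PySem.List.pyRange 0 cols 1).foldl (fun total j =>
      if pvAt grid i j = 0 then
        total + PySem.Set.len
          ((PySem.List.pyRange 1 10 1).foldl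
            (fun fr h => pvNext grid rows cols fr h)
            (PySem.Set.ofList [(i, j)]))
      else total) total) 0

-- ===== PRECONDITION & SPEC =====
-- Pre_ excludes exactly the inputs on which Python A raises an IndexError: the
-- empty grid (grid[0]) and ragged grids with some row shorter than row 0.
def Pre_find_trailhead_scores (grid : List (List Int)) : Prop :=
  grid ≠ [] ∧ ∀ row ∈ grid, (grid.headD []).length ≤ row.length
instance (grid : List (List Int)) : Decidable (Pre_find_trailhead_scores grid) := by
  unfold Pre_find_trailhead_scores; infer_instance

def pvWitness_find_trailhead_scores : List (List Int) :=
  [[0, 1, 2], [1, 2, 9], [0, 3, 8]]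

def Spec_find_trailhead_scores (grid : List (List Int)) (out : Int) : Prop :=
  out = find_trailhead_scores_alt grid
instance (grid : List (List Int)) (out : Int) :
    Decidable (Spec_find_trailhead_scores grid out) := by
  unfold Spec_find_trailhead_scores; infer_instance

-- ===== CLAIM (what is proved, stated in full; the proofs are below) =====
def Claim_equal_find_trailhead_scores : Prop :=
  ∀ (grid : List (List Int)), Dom_find_trailhead_scores grid →
    Pre_find_trailhead_scores grid →
    Spec_find_trailhead_scores grid (find_trailhead_scores grid)

-- ===== LEMMAS AND PROOFS =====

-- in-bounds cell of value h+1 (used to characterize both neighbour scans)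
abbrev pvOk (grid : List (List Int)) (rows cols h : Int) (n : Int × Int) : Prop :=
  0 ≤ n.1 ∧ n.1 < rows ∧ 0 ≤ n.2 ∧ n.2 < cols ∧ pvAt grid n.1 n.2 = h + 1

lemma pvNbrs_eq (grid : List (List Int)) (rows cols r c h : Int) :
    pvNbrs grid rows cols r c h =
      ([((0 : Int), (1 : Int)), (1, 0), (0, -1), (-1, 0)].filter
        (fun d => decide (pvOk grid rows cols h (r + d.1, c + d.2)))).map
        (fun d => (r + d.1, c + d.2)) := by
  have H := PySem.List.foldl_append_if
    (l := [((0 : Int), (1 : Int)), (1, 0), (0, -1), (-1, 0)])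
    (p := fun d => decide (pvOk grid rows cols h (r + d.1, c + d.2)))
    (f := fun d => (r + d.1, c + d.2)) (acc := [])
  simpa [pvNbrs, pvOk, decide_eq_true_eq] using H
lemma mem_pvNbrs (grid : List (List Int)) (rows cols r c h : Int) (x : Int × Int) :
    x ∈ pvNbrs grid rows cols r c h ↔
      ((x = (r, c + 1) ∨ x = (r + 1, c) ∨ x = (r, c - 1) ∨ x = (r - 1, c)) ∧
        pvOk grid rows cols h x) := by
  rw [pvNbrs_eq]
  simp only [List.mem_map, List.mem_filter, List.mem_cons, List.not_mem_nil,
    or_false, decide_eq_true_eq]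
  constructor
  · rintro ⟨d, ⟨(rfl | rfl | rfl | rfl), hok⟩, rfl⟩ <;> simp_all [sub_eq_add_neg] <;> (try exact hok)
  · rintro ⟨(rfl | rfl | rfl | rfl), hok⟩
    · exact ⟨(0, 1), ⟨by norm_num, by simpa using hok⟩, by norm_num⟩
    · exact ⟨(1, 0), ⟨by norm_num, by simpa using hok⟩, by norm_num⟩
    · refine ⟨(0, -1), ⟨by norm_num, ?_⟩, ?_⟩
      · rw [show r + ((0 : Int), (-1 : Int)).1 = r from by ring,
          show c + ((0 : Int), (-1 : Int)).2 = c - 1 from by ring]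
        exact hok
      · rw [show r + ((0 : Int), (-1 : Int)).1 = r from by ring,
          show c + ((0 : Int), (-1 : Int)).2 = c - 1 from by ring]
    · refine ⟨(-1, 0), ⟨by norm_num, ?_⟩, ?_⟩
      · rw [show r + ((-1 : Int), (0 : Int)).1 = r - 1 from by ring,
          show c + ((-1 : Int), (0 : Int)).2 = c from by ring]
        exact hok
      · rw [show r + ((-1 : Int), (0 : Int)).1 = r - 1 from by ring,
          show c + ((-1 : Int), (0 : Int)).2 = c from by ring]
lemma pvNbrs_height (grid : List (List Int)) (rows cols r c h : Int)
    (x : Int × Int) (hx : x ∈ pvNbrs grid rows cols r c h) :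
    pvAt grid x.1 x.2 = h + 1 :=
  ((mem_pvNbrs grid rows cols r c h x).mp hx).2.2.2.2.2

def pvRP (grid : List (List Int)) (rows cols : Int) :
    Nat → Int × Int → Finset (Int × Int)
  | 0, p => if pvAt grid p.1 p.2 = 9 then {p} else ∅
  | f + 1, p =>
    if pvAt grid p.1 p.2 = 9 then {p}
    else (pvNbrs grid rows cols p.1 p.2 (pvAt grid p.1 p.2)).toFinset.biUnion
      (pvRP grid rows cols f)

def pvReach (grid : List (List Int)) (rows cols : Int) (p : Int × Int) :
    Finset (Int × Int) := pvRP grid rows cols 10 p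

lemma pvRP_stable (grid : List (List Int)) (rows cols : Int) :
    ∀ (f : Nat) (p : Int × Int), 9 ≤ (f : Int) + pvAt grid p.1 p.2 →
      pvRP grid rows cols (f + 1) p = pvRP grid rows cols f p := by
  intro f
  induction f with
  | zero =>
    intro p hp
    simp only [Nat.cast_zero, zero_add] at hp
    by_cases h9 : pvAt grid p.1 p.2 = 9
    · simp [pvRP, h9]
    · have h10 : 10 ≤ pvAt grid p.1 p.2 := by omega
      ext x
      simp only [pvRP, h9, if_false, Finset.mem_biUnion, List.mem_toFinset,
        Finset.notMem_empty, iff_false, not_exists, not_and]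
      intro n hn hx
      have hh := pvNbrs_height grid rows cols p.1 p.2 (pvAt grid p.1 p.2) n hn
      rw [if_neg (by omega)] at hx
      exact absurd hx (Finset.notMem_empty x)
  | succ f ih =>
    intro p hp
    by_cases h9 : pvAt grid p.1 p.2 = 9
    · simp [pvRP, h9]
    · simp only [pvRP, h9, if_false]
      apply Finset.biUnion_congr rfl
      intro n hn
      apply ih
      have := pvNbrs_height grid rows cols p.1 p.2 (pvAt grid p.1 p.2) n (by simpa using hn)
      omega

lemma pvRP_add (grid : List (List Int)) (rows cols : Int) :
    ∀ (k f : Nat) (p : Int × Int), 9 ≤ (f : Int) + pvAt grid p.1 p.2 →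
      pvRP grid rows cols (f + k) p = pvRP grid rows cols f p := by
  intro k
  induction k with
  | zero => intro f p _; rfl
  | succ k ih =>
    intro f p hp
    have h1 : f + (k + 1) = (f + k) + 1 := by omega
    rw [h1, pvRP_stable grid rows cols (f + k) p (by push_cast; omega), ih f p hp]

lemma pvRP_eq_reach (grid : List (List Int)) (rows cols : Int) :
    ∀ (f : Nat) (p : Int × Int), 0 ≤ pvAt grid p.1 p.2 →
      9 ≤ (f : Int) + pvAt grid p.1 p.2 →
      pvRP grid rows cols f p = pvReach grid rows cols p := by
  intro f p h0 hp
  unfold pvReach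
  by_cases hf : f ≤ 10
  · rw [show 10 = f + (10 - f) from by omega, pvRP_add grid rows cols (10 - f) f p hp]
  · rw [show f = 10 + (f - 10) from by omega,
      pvRP_add grid rows cols (f - 10) 10 p (by push_cast; omega)]

lemma pvReach_peak (grid : List (List Int)) (rows cols : Int) (p : Int × Int)
    (h9 : pvAt grid p.1 p.2 = 9) : pvReach grid rows cols p = {p} := by
  simp [pvReach, pvRP, h9]

lemma pvReach_expand (grid : List (List Int)) (rows cols : Int) (p : Int × Int)
    (h0 : 0 ≤ pvAt grid p.1 p.2) (h9 : pvAt grid p.1 p.2 ≠ 9) (x : Int × Int) :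
    x ∈ pvReach grid rows cols p ↔
      ∃ n ∈ pvNbrs grid rows cols p.1 p.2 (pvAt grid p.1 p.2),
        x ∈ pvReach grid rows cols n := by
  have e : pvReach grid rows cols p =
      (pvNbrs grid rows cols p.1 p.2 (pvAt grid p.1 p.2)).toFinset.biUnion
        (pvRP grid rows cols 9) := by
    rw [pvReach, show (10 : Nat) = 9 + 1 from rfl, pvRP, if_neg h9]
  rw [e]
  simp only [Finset.mem_biUnion, List.mem_toFinset]
  constructor
  · rintro ⟨n, hn, hx⟩
    have hh := pvNbrs_height grid rows cols p.1 p.2 (pvAt grid p.1 p.2) n hn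
    exact ⟨n, hn, by rwa [pvRP_eq_reach grid rows cols 9 n (by omega) (by omega)] at hx⟩
  · rintro ⟨n, hn, hx⟩
    have hh := pvNbrs_height grid rows cols p.1 p.2 (pvAt grid p.1 p.2) n hn
    exact ⟨n, hn, by rwa [pvRP_eq_reach grid rows cols 9 n (by omega) (by omega)]⟩

def pvInv (grid : List (List Int)) (rows cols : Int)
    (V P : List (Int × Int)) (h : Int) : Prop :=
  ∀ v ∈ V, h ≤ pvAt grid v.1 v.2 →
    ∀ x ∈ pvReach grid rows cols v, x ∈ P

lemma pvDfs_spec (grid : List (List Int)) (rows cols : Int) :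
    ∀ (fuel : Nat) (p : Int × Int) (V P : List (Int × Int)),
      0 ≤ pvAt grid p.1 p.2 → pvAt grid p.1 p.2 ≤ 9 →
      10 ≤ (fuel : Int) + pvAt grid p.1 p.2 →
      V.Nodup → P.Nodup → pvInv grid rows cols V P (pvAt grid p.1 p.2) →
      (∀ v ∈ V, v ∈ (pvDfs grid rows cols fuel p (V, P)).1) ∧
      (∀ v ∈ (pvDfs grid rows cols fuel p (V, P)).1,
        v ∈ V ∨ v = p ∨ pvAt grid p.1 p.2 + 1 ≤ pvAt grid v.1 v.2) ∧
      (pvDfs grid rows cols fuel p (V, P)).1.Nodup ∧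
      (pvDfs grid rows cols fuel p (V, P)).2.Nodup ∧
      (∀ x, x ∈ (pvDfs grid rows cols fuel p (V, P)).2 ↔
        x ∈ P ∨ x ∈ pvReach grid rows cols p) ∧
      pvInv grid rows cols (pvDfs grid rows cols fuel p (V, P)).1
        (pvDfs grid rows cols fuel p (V, P)).2 (pvAt grid p.1 p.2) := by
  intro fuel
  induction fuel with
  | zero =>
    intro p V P h0 h9 hf
    exfalso
    push_cast at hf
    omega
  | succ fuel ih =>
    intro p V P h0 h9le hf hVnd hPnd hInv
    have edfs : pvDfs grid rows cols (fuel + 1) p (V, P) =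
        if p ∈ V then (V, P)
        else if pvAt grid p.1 p.2 = 9 then (PySem.Set.add V p, PySem.Set.add P p)
        else (pvNbrs grid rows cols p.1 p.2 (pvAt grid p.1 p.2)).foldl
          (fun st n => pvDfs grid rows cols fuel n st) (PySem.Set.add V p, P) := rfl
    by_cases hmem : p ∈ V
    · rw [edfs, if_pos hmem]
      refine ⟨fun v hv => hv, fun v hv => Or.inl hv, hVnd, hPnd, ?_, hInv⟩
      intro x
      constructor
      · exact Or.inl
      · rintro (hx | hx)
        · exact hx
        · exact hInv p hmem le_rfl x hx
    · by_cases h9 : pvAt grid p.1 p.2 = 9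
      · rw [edfs, if_neg hmem, if_pos h9]
        have hre : pvReach grid rows cols p = {p} := pvReach_peak grid rows cols p h9
        refine ⟨fun v hv => (PySem.Set.mem_add V p v).mpr (Or.inl hv),
          fun v hv => ?_, PySem.Set.nodup_add V p hVnd, PySem.Set.nodup_add P p hPnd,
          ?_, ?_⟩
        · rcases (PySem.Set.mem_add V p v).mp hv with hv | hv
          · exact Or.inl hv
          · exact Or.inr (Or.inl hv)
        · intro x
          rw [PySem.Set.mem_add, hre, Finset.mem_singleton]
        · intro v hv hhv x hx
          rcases (PySem.Set.mem_add V p v).mp hv with hv | heq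
          · exact (PySem.Set.mem_add P p x).mpr (Or.inl (hInv v hv hhv x hx))
          · subst heq
            rw [hre, Finset.mem_singleton] at hx
            exact (PySem.Set.mem_add P _ x).mpr (Or.inr hx)
      · -- expand case
        have hlt : pvAt grid p.1 p.2 ≤ 8 := by omega
        have hfold : ∀ (l : List (Int × Int)),
            (∀ n ∈ l, pvAt grid n.1 n.2 = pvAt grid p.1 p.2 + 1) →
            ∀ (V' P' : List (Int × Int)), V'.Nodup → P'.Nodup →
            pvInv grid rows cols V' P' (pvAt grid p.1 p.2 + 1) →
            (∀ v ∈ V', v ∈ (l.foldl (fun st n => pvDfs grid rows cols fuel n st) (V', P')).1) ∧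
            (∀ v ∈ (l.foldl (fun st n => pvDfs grid rows cols fuel n st) (V', P')).1,
              v ∈ V' ∨ pvAt grid p.1 p.2 + 1 ≤ pvAt grid v.1 v.2) ∧
            (l.foldl (fun st n => pvDfs grid rows cols fuel n st) (V', P')).1.Nodup ∧
            (l.foldl (fun st n => pvDfs grid rows cols fuel n st) (V', P')).2.Nodup ∧
            (∀ x, x ∈ (l.foldl (fun st n => pvDfs grid rows cols fuel n st) (V', P')).2 ↔
              x ∈ P' ∨ ∃ n ∈ l, x ∈ pvReach grid rows cols n) ∧
            pvInv grid rows cols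
              (l.foldl (fun st n => pvDfs grid rows cols fuel n st) (V', P')).1
              (l.foldl (fun st n => pvDfs grid rows cols fuel n st) (V', P')).2
              (pvAt grid p.1 p.2 + 1) := by
          intro l
          induction l with
          | nil =>
            intro _ V' P' hV hP hI
            simp only [List.foldl_nil]
            exact ⟨fun v hv => hv, fun v hv => Or.inl hv, hV, hP,
              fun x => by simp, hI⟩
          | cons n l' ihl =>
            intro hhts V' P' hV hP hI
            have hn : pvAt grid n.1 n.2 = pvAt grid p.1 p.2 + 1 :=
              hhts n (List.mem_cons_self)
            have hstep := ih n V' P' (by omega) (by rw [hn]; omega)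
              (by push_cast at hf ⊢; omega) hV hP (by rw [hn]; exact hI)
            set st1 := pvDfs grid rows cols fuel n (V', P') with hst1
            obtain ⟨s1, s2, s3, s4, s5, s6⟩ := hstep
            have hrest := ihl (fun m hm => hhts m (List.mem_cons_of_mem n hm))
              st1.1 st1.2 s3 s4 (by
                intro v hv hhv x hx
                rw [hn] at s6
                exact s6 v hv (by omega) x hx)
            simp only [List.foldl_cons]
            rw [show (pvDfs grid rows cols fuel n (V', P')) = st1 from rfl]
            rw [show (st1.1, st1.2) = st1 from rfl] at hrest
            obtain ⟨r1, r2, r3, r4, r5, r6⟩ := hrest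
            refine ⟨fun v hv => r1 v (s1 v hv), ?_, r3, r4, ?_, r6⟩
            · intro v hv
              rcases r2 v hv with hv' | hv'
              · rcases s2 v hv' with h | h | h
                · exact Or.inl h
                · subst h; right; rw [hn]
                · right; omega
              · exact Or.inr hv'
            · intro x
              rw [r5 x, s5 x, hn] at *
              constructor
              · rintro ((hx | hx) | ⟨m, hm, hx⟩)
                · exact Or.inl hx
                · exact Or.inr ⟨n, List.mem_cons_self, hx⟩
                · exact Or.inr ⟨m, List.mem_cons_of_mem n hm, hx⟩
              · rintro (hx | ⟨m, hm, hx⟩)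
                · exact Or.inl (Or.inl hx)
                · rcases List.mem_cons.mp hm with rfl | hm
                  · exact Or.inl (Or.inr hx)
                  · exact Or.inr ⟨m, hm, hx⟩
        rw [edfs, if_neg hmem, if_neg h9]
        have hnbrs : ∀ n ∈ pvNbrs grid rows cols p.1 p.2 (pvAt grid p.1 p.2),
            pvAt grid n.1 n.2 = pvAt grid p.1 p.2 + 1 :=
          fun n hn => pvNbrs_height grid rows cols p.1 p.2 (pvAt grid p.1 p.2) n hn
        have hI' : pvInv grid rows cols (PySem.Set.add V p) P (pvAt grid p.1 p.2 + 1) := by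
          intro v hv hhv x hx
          rcases (PySem.Set.mem_add V p v).mp hv with hv | rfl
          · exact hInv v hv (by omega) x hx
          · omega
        obtain ⟨f1, f2, f3, f4, f5, f6⟩ := hfold _ hnbrs (PySem.Set.add V p) P
          (PySem.Set.nodup_add V p hVnd) hPnd hI'
        refine ⟨?_, ?_, f3, f4, ?_, ?_⟩
        · exact fun v hv => f1 v ((PySem.Set.mem_add V p v).mpr (Or.inl hv))
        · intro v hv
          rcases f2 v hv with hv' | hv'
          · rcases (PySem.Set.mem_add V p v).mp hv' with h | h
            · exact Or.inl h
            · exact Or.inr (Or.inl h)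
          · exact Or.inr (Or.inr hv')
        · intro x
          rw [f5 x, pvReach_expand grid rows cols p h0 h9 x]
        · intro v hv hhv x hx
          by_cases hge : pvAt grid p.1 p.2 + 1 ≤ pvAt grid v.1 v.2
          · exact f6 v hv hge x hx
          · have hveq : pvAt grid v.1 v.2 = pvAt grid p.1 p.2 := by omega
            rcases f2 v hv with hv' | hv'
            · rcases (PySem.Set.mem_add V p v).mp hv' with h | heq
              · have := hInv v h (by omega) x hx
                exact ((f5 x).mpr (Or.inl this))
              · subst heq
                exact (f5 x).mpr (Or.inr
                  ((pvReach_expand grid rows cols _ h0 h9 x).mp hx))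
            · omega

-- conditional-add fold = Set.update with the filtered list
lemma foldl_add_if_eq_update {α : Type} [BEq α] [LawfulBEq α]
    (Q : α → Prop) [DecidablePred Q] :
    ∀ (l : List α) (s : PySem.Set α),
      l.foldl (fun s n => if Q n then PySem.Set.add s n else s) s =
        PySem.Set.update s (l.filter (fun n => decide (Q n))) := by
  intro l
  induction l with
  | nil => intro s; simp [PySem.Set.update]
  | cons n l ih =>
    intro s
    by_cases hq : Q n
    · simp only [List.foldl_cons, List.filter_cons, hq, decide_true, if_true,
        PySem.Set.update_cons, ih]
    · simp only [List.foldl_cons, List.filter_cons, hq, decide_false,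
        Bool.false_eq_true, if_false, ih]

lemma mem_foldl_update {α β : Type} [BEq α] [LawfulBEq α]
    (g : β → List α) :
    ∀ (F : List β) (s : PySem.Set α) (y : α),
      y ∈ F.foldl (fun s b => PySem.Set.update s (g b)) s ↔
        y ∈ s ∨ ∃ b ∈ F, y ∈ g b := by
  intro F
  induction F with
  | nil => intro s y; simp
  | cons b F ih =>
    intro s y
    simp only [List.foldl_cons, ih, PySem.Set.mem_update, List.mem_cons]
    constructor
    · rintro ((hy | hy) | ⟨b', hb', hy⟩)
      · exact Or.inl hy
      · exact Or.inr ⟨b, Or.inl rfl, hy⟩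
      · exact Or.inr ⟨b', Or.inr hb', hy⟩
    · rintro (hy | ⟨b', (rfl | hb'), hy⟩)
      · exact Or.inl (Or.inl hy)
      · exact Or.inl (Or.inr hy)
      · exact Or.inr ⟨b', hb', hy⟩

lemma nodup_foldl_update {α β : Type} [BEq α] [LawfulBEq α]
    (g : β → List α) :
    ∀ (F : List β) (s : PySem.Set α), s.Nodup →
      (F.foldl (fun s b => PySem.Set.update s (g b)) s).Nodup := by
  intro F
  induction F with
  | nil => intro s hs; exact hs
  | cons b F ih =>
    intro s hs
    exact ih _ (PySem.Set.nodup_update s (g b) hs)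

lemma pvNext_eq (grid : List (List Int)) (rows cols : Int)
    (F : List (Int × Int)) (h : Int) :
    pvNext grid rows cols F h =
      F.foldl (fun s c => PySem.Set.update s
        (([(c.1, c.2 + 1), (c.1 + 1, c.2), (c.1, c.2 - 1), (c.1 - 1, c.2)]).filter
          (fun n => decide (0 ≤ n.1 ∧ n.1 < rows ∧ 0 ≤ n.2 ∧ n.2 < cols ∧
            pvAt grid n.1 n.2 = h)))) PySem.Set.empty := by
  unfold pvNext
  apply PySem.List.foldl_congr_mem
  intro acc c _
  exact foldl_add_if_eq_update _ _ acc

lemma nodup_pvNext (grid : List (List Int)) (rows cols : Int)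
    (F : List (Int × Int)) (h : Int) : (pvNext grid rows cols F h).Nodup := by
  rw [pvNext_eq]
  exact nodup_foldl_update _ F PySem.Set.empty List.nodup_nil

lemma mem_pvNext (grid : List (List Int)) (rows cols : Int)
    (F : List (Int × Int)) (h : Int) (hF : ∀ c ∈ F, pvAt grid c.1 c.2 = h - 1)
    (x : Int × Int) :
    x ∈ pvNext grid rows cols F h ↔
      ∃ c ∈ F, x ∈ pvNbrs grid rows cols c.1 c.2 (pvAt grid c.1 c.2) := by
  rw [pvNext_eq, mem_foldl_update]
  simp only [PySem.Set.empty, List.not_mem_nil, false_or]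
  constructor
  · rintro ⟨c, hc, hx⟩
    rw [List.mem_filter, decide_eq_true_eq] at hx
    obtain ⟨hcand, hok⟩ := hx
    refine ⟨c, hc, (mem_pvNbrs grid rows cols c.1 c.2 _ x).mpr ⟨?_, ?_⟩⟩
    · simpa using hcand
    · have hc' := hF c hc
      exact ⟨hok.1, hok.2.1, hok.2.2.1, hok.2.2.2.1, by omega⟩
  · rintro ⟨c, hc, hx⟩
    rw [mem_pvNbrs] at hx
    obtain ⟨hcand, hok⟩ := hx
    refine ⟨c, hc, ?_⟩
    rw [List.mem_filter, decide_eq_true_eq]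
    have hc' := hF c hc
    exact ⟨by simpa using hcand,
      hok.1, hok.2.1, hok.2.2.1, hok.2.2.2.1, by have := hok.2.2.2.2; omega⟩

lemma pvFrontier_spec (grid : List (List Int)) (rows cols : Int) :
    ∀ (n : Nat) (k : Int) (F : List (Int × Int)), k = 9 - (n : Int) → 0 ≤ k →
      F.Nodup → (∀ c ∈ F, pvAt grid c.1 c.2 = k) →
      ((PySem.List.pyRange (k + 1) 10 1).foldl
          (fun fr h => pvNext grid rows cols fr h) F).Nodup ∧
      (∀ x, x ∈ (PySem.List.pyRange (k + 1) 10 1).foldl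
          (fun fr h => pvNext grid rows cols fr h) F ↔
        ∃ c ∈ F, x ∈ pvReach grid rows cols c) := by
  intro n
  induction n with
  | zero =>
    intro k F hk h0 hnd hht
    have hk9 : k = 9 := by simpa using hk
    subst hk9
    rw [show PySem.List.pyRange (9 + 1) 10 1 = [] from by
      simp [PySem.List.pyRange_zero]]
    simp only [List.foldl_nil]
    refine ⟨hnd, fun x => ?_⟩
    constructor
    · intro hx
      exact ⟨x, hx, by rw [pvReach_peak grid rows cols x (hht x hx)]; simp⟩
    · rintro ⟨c, hc, hx⟩
      rw [pvReach_peak grid rows cols c (hht c hc), Finset.mem_singleton] at hx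
      subst hx; exact hc
  | succ n ihn =>
    intro k F hk h0 hnd hht
    push_cast at hk
    have hk8 : k ≤ 8 := by omega
    rw [PySem.List.pyRange_one_cons (by omega : k + 1 < 10)]
    simp only [List.foldl_cons]
    have hF' : ∀ c' ∈ pvNext grid rows cols F (k + 1), pvAt grid c'.1 c'.2 = k + 1 := by
      intro c' hc'
      rw [mem_pvNext grid rows cols F (k + 1)
        (fun c hc => by rw [hht c hc]; ring) c'] at hc'
      obtain ⟨c, hc, hn⟩ := hc'
      have := pvNbrs_height grid rows cols c.1 c.2 (pvAt grid c.1 c.2) c' hn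
      rw [this, hht c hc]
    have hrec := ihn (k + 1) (pvNext grid rows cols F (k + 1)) (by push_cast; omega)
      (by omega) (nodup_pvNext grid rows cols F (k + 1)) hF'
    refine ⟨hrec.1, fun x => ?_⟩
    rw [hrec.2 x]
    constructor
    · rintro ⟨c', hc', hx⟩
      rw [mem_pvNext grid rows cols F (k + 1)
        (fun c hc => by rw [hht c hc]; ring) c'] at hc'
      obtain ⟨c, hc, hn⟩ := hc'
      refine ⟨c, hc, ?_⟩
      rw [pvReach_expand grid rows cols c (by rw [hht c hc]; omega)
        (by rw [hht c hc]; omega) x]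
      exact ⟨c', hn, hx⟩
    · rintro ⟨c, hc, hx⟩
      rw [pvReach_expand grid rows cols c (by rw [hht c hc]; omega)
        (by rw [hht c hc]; omega) x] at hx
      obtain ⟨n', hn', hx⟩ := hx
      refine ⟨n', ?_, hx⟩
      rw [mem_pvNext grid rows cols F (k + 1)
        (fun c hc => by rw [hht c hc]; ring)]
      exact ⟨c, hc, hn'⟩

-- trailhead list of A's scan: first components, row-major filter
lemma pvScan_fst (grid : List (List Int)) (rows cols : Int) :
    (pvScan grid rows cols).1 =
      (PySem.List.pyRange 0 rows 1).flatMap (fun i =>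
        ((PySem.List.pyRange 0 cols 1).filter
          (fun j => decide (pvAt grid i j = 0))).map (fun j => (i, j))) := by
  have hinner : ∀ (i : Int) (js : List Int) (acc : List (Int × Int) × List (Int × Int)),
      (js.foldl (fun acc j =>
        if pvAt grid i j = 0 then (acc.1 ++ [(i, j)], acc.2)
        else if pvAt grid i j = 9 then (acc.1, acc.2 ++ [(i, j)])
        else acc) acc).1 =
      acc.1 ++ (js.filter (fun j => decide (pvAt grid i j = 0))).map (fun j => (i, j)) := by
    intro i js
    induction js with
    | nil => intro acc; simp
    | cons j js ih =>
      intro acc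
      by_cases h0 : pvAt grid i j = 0
      · simp only [List.foldl_cons, List.filter_cons, h0, decide_true, if_true, ih,
          List.map_cons]
        simp
      · by_cases h9 : pvAt grid i j = 9
        · simp only [List.foldl_cons, List.filter_cons, h0, h9, ih]
          norm_num
        · simp only [List.foldl_cons, List.filter_cons, h0, h9, ih]
          norm_num [h0]
  have houter : ∀ (is : List Int) (acc : List (Int × Int) × List (Int × Int)),
      (is.foldl (fun acc i => (PySem.List.pyRange 0 cols 1).foldl (fun acc j =>
        if pvAt grid i j = 0 then (acc.1 ++ [(i, j)], acc.2)
        else if pvAt grid i j = 9 then (acc.1, acc.2 ++ [(i, j)])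
        else acc) acc) acc).1 =
      acc.1 ++ is.flatMap (fun i => ((PySem.List.pyRange 0 cols 1).filter
        (fun j => decide (pvAt grid i j = 0))).map (fun j => (i, j))) := by
    intro is
    induction is with
    | nil => intro acc; simp
    | cons i is ih =>
      intro acc
      simp only [List.foldl_cons, List.flatMap_cons, ih, hinner, List.append_assoc]
  unfold pvScan
  rw [houter]
  simp

lemma len_eq_card (l : List (Int × Int)) (s : Finset (Int × Int))
    (hnd : l.Nodup) (hm : ∀ x, x ∈ l ↔ x ∈ s) :
    PySem.Set.len l = (s.card : Int) := by
  have h1 : l.toFinset = s := by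
    ext x; simp [List.mem_toFinset, hm x]
  have h2 : l.toFinset.card = l.length := List.toFinset_card_of_nodup hnd
  simp only [PySem.Set.len]
  rw [← h1, h2]

lemma pvScoreA (grid : List (List Int)) (rows cols : Int) (t : Int × Int)
    (ht : pvAt grid t.1 t.2 = 0) :
    PySem.Set.len (pvDfs grid rows cols 10 t (PySem.Set.empty, PySem.Set.empty)).2 =
      ((pvReach grid rows cols t).card : Int) := by
  obtain ⟨-, -, -, hnd, hmem, -⟩ := pvDfs_spec grid rows cols 10 t
    PySem.Set.empty PySem.Set.empty
    (by rw [ht]) (by rw [ht]; norm_num) (by rw [ht]; norm_num)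
    List.nodup_nil List.nodup_nil (by intro v hv; simp [PySem.Set.empty] at hv)
  exact len_eq_card _ _ hnd (fun x => by
    rw [hmem x]; simp [PySem.Set.empty])

lemma pvScoreB (grid : List (List Int)) (rows cols i j : Int)
    (ht : pvAt grid i j = 0) :
    PySem.Set.len ((PySem.List.pyRange 1 10 1).foldl
        (fun fr h => pvNext grid rows cols fr h) (PySem.Set.ofList [(i, j)])) =
      ((pvReach grid rows cols (i, j)).card : Int) := by
  have hof : PySem.Set.ofList [((i : Int), (j : Int))] = [(i, j)] :=
    PySem.Set.ofList_eq_self_of_nodup _ (by simp)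
  obtain ⟨hnd, hmem⟩ := pvFrontier_spec grid rows cols 9 0 [(i, j)]
    (by norm_num) le_rfl (by simp) (by intro c hc; simp at hc; subst hc; simpa using ht)
  rw [show ((0 : Int) + 1) = 1 from by norm_num] at hnd hmem
  rw [hof]
  exact len_eq_card _ _ hnd (fun x => by rw [hmem x]; simp)

lemma pv_sum_flatMap (g : Int → List Int) (l : List Int) :
    (l.flatMap g).sum = (l.map (fun i => (g i).sum)).sum := by
  induction l with
  | nil => rfl
  | cons i l ih => simp [List.flatMap_cons, ih]

lemma pv_sum_filter_ite (l : List Int) (P : Int → Bool) (f : Int → Int) :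
    ((l.filter P).map f).sum = (l.map (fun x => if P x then f x else 0)).sum := by
  induction l with
  | nil => rfl
  | cons x l ih => by_cases h : P x <;> simp [h, ih]

lemma pv_main (grid : List (List Int)) :
    find_trailhead_scores grid = find_trailhead_scores_alt grid := by
  simp only [find_trailhead_scores, find_trailhead_scores_alt]
  set R : Int := (grid.length : Int) with hR
  set C : Int := ((PySem.List.pyGetD grid 0 []).length : Int) with hC
  -- A side
  rw [pvScan_fst, PySem.List.foldl_add, zero_add, List.map_flatMap,
    pv_sum_flatMap]
  -- B side: additive shape for the inner loop, then foldl_add twice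
  have hB : ∀ (i : Int) (total : Int),
      (PySem.List.pyRange 0 C 1).foldl (fun total j =>
        if pvAt grid i j = 0 then
          total + PySem.Set.len ((PySem.List.pyRange 1 10 1).foldl
            (fun fr h => pvNext grid R C fr h) (PySem.Set.ofList [(i, j)]))
        else total) total =
      total + ((PySem.List.pyRange 0 C 1).map (fun j =>
        if pvAt grid i j = 0 then ((pvReach grid R C (i, j)).card : Int)
        else 0)).sum := by
    intro i total
    rw [PySem.List.foldl_congr_mem _ _ (fun total j =>
      total + (if pvAt grid i j = 0 then ((pvReach grid R C (i, j)).card : Int) else 0))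
      total ?_]
    · exact PySem.List.foldl_add _ _ _
    · intro acc j _
      dsimp only
      by_cases h : pvAt grid i j = 0
      · rw [if_pos h, pvScoreB grid R C i j h]
        simp [h]
      · rw [if_neg h]
        simp [h]
  rw [PySem.List.foldl_congr_mem _ _ (fun total i =>
    total + ((PySem.List.pyRange 0 C 1).map (fun j =>
      if pvAt grid i j = 0 then ((pvReach grid R C (i, j)).card : Int) else 0)).sum)
    0 (fun acc i _ => hB i acc)]
  rw [PySem.List.foldl_add, zero_add]
  -- both are now sums over pyRange 0 R; identify the row summands
  congr 1
  apply List.map_congr_left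
  intro i _
  rw [List.map_map, pv_sum_filter_ite]
  apply congrArg
  apply List.map_congr_left
  intro j _
  by_cases h : pvAt grid i j = 0
  · rw [if_pos (by simpa using h : decide (pvAt grid i j = 0) = true), if_pos h]
    show PySem.Set.len (pvDfs grid R C 10 (i, j) (PySem.Set.empty, PySem.Set.empty)).2 =
      ((pvReach grid R C (i, j)).card : Int)
    exact pvScoreA grid R C (i, j) (by simpa using h)
  · rw [if_neg (by simpa using h : ¬ decide (pvAt grid i j = 0) = true), if_neg h]

-- ===== VERDICT (by name: the statement is the Claim_ definition above) =====
theorem find_trailhead_scores_spec : Claim_equal_find_trailhead_scores := by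
  intro grid _ _
  unfold Spec_find_trailhead_scores
  exact pv_main grid
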